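-- pv_equiv track=rewrite | github.com/bgroveben/coursera_LTP_TF | final_exam.py | get_diagonal_and_non_diagonal
-- ===== SOURCE A (Python) =====
-- def get_diagonal_and_non_diagonal(L):
--     '''(list of list of int) -> tuple of (list of int, list of int)
--
--     Return a tuple where the first item is a list of the values on the
--     diagonal of square nested list L and the second item is a list of the rest
--     of the values in L.
--
--     >>> get_diagonal_and_non_diagonal([[1,  3,  5], [2,  4,  5], [4,  0,  8]])
--     ([1, 4, 8], [3, 5, 2, 5, 4, 0])
--     '''
--
--     diagonal = []
--     non_diagonal = []
--     for row in range(len(L)):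
--         for col in range(len(L)):
--
--             if row == col:
--                 diagonal.append(L[row][col])
--             else:
--                 non_diagonal.append(L[row][col])
--
--     return (diagonal, non_diagonal)
-- ===== SOURCE B (Python) =====
-- def get_diagonal_and_non_diagonal(L):
--     '''(list of list of int) -> tuple of (list of int, list of int)
--
--     Flatten the first n entries of the first n rows into one flat list,
--     then split that single list by flat-index arithmetic: position
--     k = r*n + c is on the diagonal exactly when k % (n + 1) == 0.
--     '''
--     n = len(L)
--     flat = [L[r][c] for r in range(n) for c in range(n)]
--     diagonal = [x for k, x in enumerate(flat) if k % (n + 1) == 0]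
--     non_diagonal = [x for k, x in enumerate(flat) if k % (n + 1) != 0]
--     return (diagonal, non_diagonal)
-- ===== Notes on version B (the rewrite author's own statement) =====
-- stated objective: alternative
-- what changed: B flattens the n*n cells into one flat list and partitions it by flat-index modular arithmetic (k % (n+1) == 0 marks the diagonal), instead of A's nested row/col loops with a row==col branch.
import Mathlib
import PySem

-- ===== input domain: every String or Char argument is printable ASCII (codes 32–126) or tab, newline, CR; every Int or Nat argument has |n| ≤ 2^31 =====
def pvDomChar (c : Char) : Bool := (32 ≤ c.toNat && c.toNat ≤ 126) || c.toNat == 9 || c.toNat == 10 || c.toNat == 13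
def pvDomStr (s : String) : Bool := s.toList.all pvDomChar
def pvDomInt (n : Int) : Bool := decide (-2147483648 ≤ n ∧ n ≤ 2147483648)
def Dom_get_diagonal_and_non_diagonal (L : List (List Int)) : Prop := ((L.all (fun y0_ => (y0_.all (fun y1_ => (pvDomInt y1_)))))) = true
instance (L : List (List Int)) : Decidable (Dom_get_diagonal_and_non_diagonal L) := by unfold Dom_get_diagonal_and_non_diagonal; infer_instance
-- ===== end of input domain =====

-- B flattens the n*n cells into one list and splits it by flat-index arithmetic (k % (n+1) == 0 is the diagonal); Pre_ excludes ragged inputs where A raises IndexError.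


-- ===== PORT A =====
-- A: one double loop over row, col in range(len(L)); branch row == col appends to
-- diagonal, else to non_diagonal. L[row][col] is in range under Pre_, so getD is exact.
def get_diagonal_and_non_diagonal (L : List (List Int)) : List Int × List Int :=
  (List.range L.length).foldl (fun st row =>
    (List.range L.length).foldl (fun st col =>
      if row = col then (st.1 ++ [(L.getD row []).getD col 0], st.2)
      else (st.1, st.2 ++ [(L.getD row []).getD col 0])) st)
    ([], [])

-- ===== PORT B =====
-- B: flatten the n*n cells into flat, then split enumerate(flat) by k % (n+1) == 0.
def get_diagonal_and_non_diagonal_alt (L : List (List Int)) : List Int × List Int :=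
  let n := L.length
  let flat := (List.range n).flatMap (fun r => (List.range n).map (fun c => (L.getD r []).getD c 0))
  (((PySem.List.enumerate flat 0).filter (fun p => PySem.Int.mod p.1 (n + 1) = 0)).map (·.2),
   ((PySem.List.enumerate flat 0).filter (fun p => ¬ PySem.Int.mod p.1 (n + 1) = 0)).map (·.2))

-- ===== PRECONDITION & SPEC =====
-- Pre_ excludes exactly the ragged inputs (some row shorter than len(L)) on which A raises IndexError.
def Pre_get_diagonal_and_non_diagonal (L : List (List Int)) : Prop :=
  ∀ row ∈ L, L.length ≤ row.length
instance (L : List (List Int)) : Decidable (Pre_get_diagonal_and_non_diagonal L) := by unfold Pre_get_diagonal_and_non_diagonal; infer_instance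
def pvWitness_get_diagonal_and_non_diagonal : List (List Int) := [[1, 3], [2, 4]]
def Spec_get_diagonal_and_non_diagonal (L : List (List Int)) (out : List Int × List Int) : Prop := out = get_diagonal_and_non_diagonal_alt L
instance (L : List (List Int)) (out : List Int × List Int) : Decidable (Spec_get_diagonal_and_non_diagonal L out) := by unfold Spec_get_diagonal_and_non_diagonal; infer_instance

-- ===== CLAIM (what is proved, stated in full; the proofs are below) =====
def Claim_equal_get_diagonal_and_non_diagonal : Prop := ∀ (L : List (List Int)), Dom_get_diagonal_and_non_diagonal L → Pre_get_diagonal_and_non_diagonal L → Spec_get_diagonal_and_non_diagonal L (get_diagonal_and_non_diagonal L)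

-- ===== LEMMAS AND PROOFS =====

-- for r, c < n the flat index r*n + c is divisible by n+1 exactly on the diagonal
theorem pv_mod_iff (n r c : Nat) (hr : r < n) (hc : c < n) :
    PySem.Int.mod ((r : Int) * n + c) ((n : Int) + 1) = 0 ↔ c = r := by
  rw [PySem.Int.mod_eq_zero_iff_dvd]
  constructor
  · intro hdvd
    have h2 : ((n : Int) + 1) ∣ ((c : Int) - r) := by
      have heq : ((r : Int) * n + c) = r * (n + 1) + (c - r) := by ring
      rw [heq] at hdvd
      exact (dvd_add_right (Dvd.intro_left _ rfl)).mp hdvd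
    have := Int.eq_zero_of_abs_lt_dvd h2 (by
      rw [abs_sub_lt_iff]
      constructor <;> omega)
    omega
  · intro h; subst h
    exact ⟨c, by ring⟩

-- enumerate of a map over range is the map of indexed pairs
theorem pv_enum_map_range (m : Nat) (s : Int) (f : Nat → Int) :
    PySem.List.enumerate ((List.range m).map f) s
      = (List.range m).map (fun (c : Nat) => (s + (c : Int), f c)) := by
  induction m generalizing s with
  | zero => simp [PySem.List.enumerate_nil]
  | succ m ih =>
    rw [List.range_succ, List.map_append, List.map_append,
        PySem.List.enumerate_append, ih]
    simp [PySem.List.enumerate_cons, PySem.List.enumerate_nil]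

-- in a duplicate-free list containing r, filtering (· = r) gives [r]
theorem pv_filter_eq_of_nodup (r : Nat) (l : List Nat) (hnd : l.Nodup) (hm : r ∈ l) :
    l.filter (fun c => c = r) = [r] := by
  induction l with
  | nil => simp at hm
  | cons a as ih =>
    simp only [List.nodup_cons] at hnd
    by_cases h : a = r
    · subst h
      have hnil : as.filter (fun c => c = a) = [] := by
        apply List.filter_eq_nil_iff.mpr
        intro b hb
        simp only [decide_eq_true_eq]
        exact fun he => hnd.1 (he ▸ hb)
      simp [hnil]
    · have h2 : r ∈ as := by
        rcases List.mem_cons.mp hm with h' | h'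
        · exact absurd h'.symm h
        · exact h'
      simp [h, ih hnd.2 h2]

-- enumerate of the flat list, row-suffix form: rows a..n-1 start at flat offset a*n
theorem pv_enum_flat (n : Nat) (v : Nat → Nat → Int) :
    ∀ (m a : Nat), a + m = n →
    PySem.List.enumerate ((List.range' a m).flatMap (fun r => (List.range n).map (v r))) ((a : Int) * n)
      = (List.range' a m).flatMap (fun (r : Nat) => (List.range n).map (fun (c : Nat) => ((r : Int) * n + (c : Int), v r c))) := by
  intro m
  induction m with
  | zero => intro a _; simp [PySem.List.enumerate_nil]
  | succ m ih =>
    intro a ha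
    rw [List.range'_succ]
    simp only [List.flatMap_cons]
    rw [PySem.List.enumerate_append]
    have hoff : ((a : Int) * n + (((List.range n).map (v a)).length : Int)) = (((a + 1 : Nat) : Int)) * n := by
      simp; ring
    rw [hoff, pv_enum_map_range, ih (a + 1) (by omega)]

-- filtering the indexed flat list by divisibility picks exactly the diagonal (resp. the rest)
theorem pv_filter_row (n r : Nat) (v : Nat → Nat → Int) (hr : r < n) :
    (((List.range n).map (fun (c : Nat) => ((r : Int) * n + (c : Int), v r c))).filter
        (fun p => decide (PySem.Int.mod p.1 ((n : Int) + 1) = 0))).map (·.2) = [v r r]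
    ∧ (((List.range n).map (fun (c : Nat) => ((r : Int) * n + (c : Int), v r c))).filter
        (fun p => decide (¬ PySem.Int.mod p.1 ((n : Int) + 1) = 0))).map (·.2)
      = ((List.range n).filter (fun c => c ≠ r)).map (v r) := by
  constructor
  · rw [List.filter_map]
    have : ((List.range n).filter
        ((fun p => decide (PySem.Int.mod p.1 ((n : Int) + 1) = 0)) ∘ (fun (c : Nat) => ((r : Int) * n + (c : Int), v r c))))
        = (List.range n).filter (fun c => c = r) := by
      apply List.filter_congr
      intro c hc
      simp only [Function.comp, decide_eq_decide]
      exact pv_mod_iff n r c hr (List.mem_range.mp hc)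
    rw [this, pv_filter_eq_of_nodup r (List.range n) List.nodup_range (List.mem_range.mpr hr)]
    simp
  · rw [List.filter_map]
    have : ((List.range n).filter
        ((fun p => decide (¬ PySem.Int.mod p.1 ((n : Int) + 1) = 0)) ∘ (fun (c : Nat) => ((r : Int) * n + (c : Int), v r c))))
        = (List.range n).filter (fun c => c ≠ r) := by
      apply List.filter_congr
      intro c hc
      simp only [Function.comp, decide_eq_decide]
      exact not_congr (pv_mod_iff n r c hr (List.mem_range.mp hc))
    rw [this, List.map_map]
    rfl

-- inner loop of A, over an arbitrary column list, splits the pair accumulator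
theorem pv_inner (row : Nat) (v : Nat → Int) (cols : List Nat) (st : List Int × List Int) :
    cols.foldl (fun st col =>
      if row = col then (st.1 ++ [v col], st.2) else (st.1, st.2 ++ [v col])) st =
    (st.1 ++ (cols.filter (fun c => c = row)).map v,
     st.2 ++ (cols.filter (fun c => c ≠ row)).map v) := by
  induction cols generalizing st with
  | nil => simp
  | cons c cs ih =>
    simp only [List.foldl_cons]
    rw [ih]
    by_cases h : row = c
    · subst h; simp
    · have h' : ¬ (c = row) := fun he => h he.symm
      simp [h, h']

-- outer loop of A in flatMap form
theorem pv_outer (n : Nat) (v : Nat → Nat → Int) (rows : List Nat)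
    (hrows : ∀ r ∈ rows, r < n) (st : List Int × List Int) :
    rows.foldl (fun st row =>
      (List.range n).foldl (fun st col =>
        if row = col then (st.1 ++ [v row col], st.2) else (st.1, st.2 ++ [v row col])) st) st =
    (st.1 ++ rows.flatMap (fun r => [v r r]),
     st.2 ++ rows.flatMap (fun r => ((List.range n).filter (fun c => c ≠ r)).map (v r))) := by
  induction rows generalizing st with
  | nil => simp
  | cons r rs ih =>
    have hr : r < n := hrows r (by simp)
    simp only [List.foldl_cons]
    rw [pv_inner r (v r) (List.range n) st,
        pv_filter_eq_of_nodup r (List.range n) List.nodup_range (List.mem_range.mpr hr),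
        ih (fun x hx => hrows x (by simp [hx]))]
    simp

-- ===== VERDICT (by name: the statement is the Claim_ definition above) =====
theorem get_diagonal_and_non_diagonal_spec : Claim_equal_get_diagonal_and_non_diagonal := by
  intro L _ _
  unfold Spec_get_diagonal_and_non_diagonal get_diagonal_and_non_diagonal get_diagonal_and_non_diagonal_alt
  rw [pv_outer L.length (fun r c => (L.getD r []).getD c 0) (List.range L.length)
      (fun r hr => List.mem_range.mp hr) ([], [])]
  have henum := pv_enum_flat L.length (fun r c => (L.getD r []).getD c 0) L.length 0 (by omega)
  rw [← List.range_eq_range'] at henum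
  simp only [Nat.cast_zero, zero_mul] at henum
  simp only [henum, Prod.mk.injEq, List.nil_append]
  constructor
  · rw [List.filter_flatMap, List.map_flatMap]
    refine List.flatMap_congr ?_
    intro r hrm
    exact ((pv_filter_row L.length r (fun r c => (L.getD r []).getD c 0) (List.mem_range.mp hrm)).1).symm
  · rw [List.filter_flatMap, List.map_flatMap]
    refine List.flatMap_congr ?_
    intro r hrm
    exact ((pv_filter_row L.length r (fun r c => (L.getD r []).getD c 0) (List.mem_range.mp hrm)).2).symm
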